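-- pv_equiv track=rewrite | github.com/julianyeong/Baekjoon | 프로그래머스/0/181921. 배열 만들기 2/배열 만들기 2.py | solution
-- ===== SOURCE A (Python) =====
-- def solution(l, r):
--     result = []
--     i = 1
--     n = 5
--
--     while True:
--         if n > r: break
--         n = 5 * int(bin(i)[2:])
--         if l <= n <= r:
--             result.append(n)
--         i += 1
--
--     return sorted(result) if result else [-1]
-- ===== SOURCE B (Python) =====
-- def solution(l, r):
--     # Breadth-first generation of the 0/1-digit multiplicands, level by digit count;
--     # levels come out in increasing order, so no sort is needed.
--     res = []
--     level = [1]
--     while level: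
--         res += [5 * q for q in level if l <= 5 * q <= r]
--         level = [t for q in level for t in (10 * q, 10 * q + 1) if 5 * t <= r]
--     return res if res else [-1]
-- ===== Notes on version B (the rewrite author's own statement) =====
-- stated objective: alternative
-- what changed: Replaces A's counter-plus-bin()-string-reinterpretation loop followed by sorted() with a breadth-first digit-extension generation (each 0/1-digit number spawns 10q and 10q+1), pruned at r, whose level order is already ascending so no sort is needed.
import Mathlib
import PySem

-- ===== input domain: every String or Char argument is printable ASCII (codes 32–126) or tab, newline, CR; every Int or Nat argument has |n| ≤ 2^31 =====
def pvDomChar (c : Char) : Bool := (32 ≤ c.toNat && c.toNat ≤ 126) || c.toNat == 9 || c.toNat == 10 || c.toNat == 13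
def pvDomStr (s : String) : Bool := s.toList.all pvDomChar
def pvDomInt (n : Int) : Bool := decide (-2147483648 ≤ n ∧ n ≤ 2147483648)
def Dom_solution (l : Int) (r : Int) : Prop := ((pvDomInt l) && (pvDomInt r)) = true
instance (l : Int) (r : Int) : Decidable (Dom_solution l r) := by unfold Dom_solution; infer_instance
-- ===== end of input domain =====

-- B differs from A: breadth-first digit-extension generation (children 10q, 10q+1) in already-ascending
-- level order, instead of A's counter + bin()-string reinterpretation + final sorted().

-- ===== PORT A =====
-- bin(i)[2:]: the binary digits of i, most significant first (bin(0)[2:] = "0"); digits kept as numbers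
def pyBinCore (n : Nat) : List Nat :=
  if h : n = 0 then [] else pyBinCore (n / 2) ++ [n % 2]
decreasing_by exact Nat.div_lt_self (Nat.pos_of_ne_zero h) (by omega)

def pyBinDigits (n : Nat) : List Nat := if n = 0 then [0] else pyBinCore n

-- int(ds) where ds are decimal digits, most significant first (base-10 Horner read, as int() parses)
def pyIntBase10 (ds : List Nat) : Nat := ds.foldl (fun a d => 10 * a + d) 0

-- the while-True loop of A; fuel only makes the recursion structurally total (r.toNat + 2 always suffices)
def loopA (fuel : Nat) (l r : Int) (result : List Int) (i : Nat) (n : Int) : List Int :=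
  match fuel with
  | 0 => result
  | f + 1 =>
    if n > r then result
    else
      let n' : Int := 5 * (pyIntBase10 (pyBinDigits i) : Int)
      let result' := if l ≤ n' ∧ n' ≤ r then result ++ [n'] else result
      loopA f l r result' (i + 1) n'

def solution (l : Int) (r : Int) : List Int :=
  let result := loopA (r.toNat + 2) l r [] 1 5
  if result = [] then [-1] else PySem.List.sorted result (fun x => x) false

-- ===== PORT B =====
-- the while-level loop of B; fuel only makes the recursion structurally total (r.toNat + 2 always suffices)
def loopB (fuel : Nat) (l r : Int) (res : List Int) (level : List Int) : List Int :=
  match fuel with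
  | 0 => res
  | f + 1 =>
    if level = [] then res
    else
      let res' := res ++ (level.filter (fun q => decide (l ≤ 5 * q ∧ 5 * q ≤ r))).map (fun q => 5 * q)
      let level' := level.flatMap (fun q => [10 * q, 10 * q + 1].filter (fun t => decide (5 * t ≤ r)))
      loopB f l r res' level'

def solution_alt (l : Int) (r : Int) : List Int :=
  let res := loopB (r.toNat + 2) l r [] [1]
  if res = [] then [-1] else res

-- ===== PRECONDITION & SPEC =====
def Spec_solution (l : Int) (r : Int) (out : List Int) : Prop := out = solution_alt l r
instance (l : Int) (r : Int) (out : List Int) : Decidable (Spec_solution l r out) := by unfold Spec_solution; infer_instance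

-- ===== CLAIM (what is proved, stated in full; the proofs are below) =====
def Claim_equal_solution : Prop := ∀ (l : Int) (r : Int), Dom_solution l r → Spec_solution l r (solution l r)

-- ===== LEMMAS AND PROOFS =====

-- the mathematical value of int(bin(i)[2:]): binary digits of i read in base 10
def binDec (n : Nat) : Nat :=
  if h : n = 0 then 0 else 10 * binDec (n / 2) + n % 2
decreasing_by exact Nat.div_lt_self (Nat.pos_of_ne_zero h) (by omega)

theorem binDec_zero : binDec 0 = 0 := by simp [binDec]

theorem binDec_pos (n : Nat) (h : n ≠ 0) : binDec n = 10 * binDec (n / 2) + n % 2 := by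
  rw [binDec]; simp [h]

theorem pyIntBase10_append (xs : List Nat) (d : Nat) :
    pyIntBase10 (xs ++ [d]) = 10 * pyIntBase10 xs + d := by
  simp [pyIntBase10, List.foldl_append]

theorem pyIntBase10_core (n : Nat) : pyIntBase10 (pyBinCore n) = binDec n := by
  induction n using Nat.strong_induction_on with
  | _ n ih =>
    by_cases h : n = 0
    · subst h; simp [pyBinCore, pyIntBase10, binDec_zero]
    · rw [pyBinCore]; simp only [h, dite_false]
      rw [pyIntBase10_append, ih (n / 2) (Nat.div_lt_self (Nat.pos_of_ne_zero h) (by omega)),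
        binDec_pos n h]

theorem pyIntBase10_binDigits (n : Nat) : pyIntBase10 (pyBinDigits n) = binDec n := by
  by_cases h : n = 0
  · subst h; simp [pyBinDigits, pyIntBase10, binDec_zero]
  · simp [pyBinDigits, h, pyIntBase10_core]

theorem binDec_ge (n : Nat) : n ≤ binDec n := by
  induction n using Nat.strong_induction_on with
  | _ n ih =>
    by_cases h : n = 0
    · simp [h, binDec_zero]
    · rw [binDec_pos n h]
      have h1 := ih (n / 2) (Nat.div_lt_self (Nat.pos_of_ne_zero h) (by omega))
      omega

theorem binDec_strictMono : StrictMono binDec := by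
  intro m n hmn
  induction n using Nat.strong_induction_on generalizing m with
  | _ n ih =>
    have hn : n ≠ 0 := by omega
    rw [binDec_pos n hn]
    by_cases hm : m = 0
    · subst hm; rw [binDec_zero]
      have : 1 ≤ binDec (n/2) + n % 2 := by
        by_cases h2 : n / 2 = 0
        · have : n = 1 := by omega
          subst this; simp [binDec_zero]
        · have := binDec_ge (n / 2); omega
      omega
    · rw [binDec_pos m hm]
      rcases Nat.lt_or_ge (m / 2) (n / 2) with h | h
      · have hlt := ih (n / 2) (Nat.div_lt_self (Nat.pos_of_ne_zero hn) (by omega)) h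
        have : m % 2 ≤ 1 := Nat.le_of_lt_succ (Nat.mod_lt m (by omega))
        omega
      · have heq : m / 2 = n / 2 := by omega
        have : m % 2 < n % 2 := by omega
        rw [heq]
        omega

theorem binDec_mono {m n : Nat} (h : m ≤ n) : binDec m ≤ binDec n := by
  rcases Nat.lt_or_ge m n with h' | h'
  · exact Nat.le_of_lt (binDec_strictMono h')
  · have : m = n := by omega
    subst this; exact Nat.le_refl _

theorem binDec_one : binDec 1 = 1 := by rw [binDec_pos 1 (by omega)]; norm_num [binDec_zero]
theorem binDec_two : binDec 2 = 10 := by rw [binDec_pos 2 (by omega)]; norm_num [binDec_one]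
theorem binDec_three : binDec 3 = 11 := by rw [binDec_pos 3 (by omega)]; norm_num [binDec_one]

theorem binDec_double (i : Nat) : binDec (2 * i) = 10 * binDec i := by
  by_cases h : i = 0
  · simp [h, binDec_zero]
  · rw [binDec_pos (2 * i) (by omega)]
    have h1 : 2 * i / 2 = i := by omega
    have h2 : 2 * i % 2 = 0 := by omega
    rw [h1, h2]
    omega

theorem binDec_double_succ (i : Nat) : binDec (2 * i + 1) = 10 * binDec i + 1 := by
  rw [binDec_pos (2 * i + 1) (by omega)]
  have h1 : (2 * i + 1) / 2 = i := by omega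
  have h2 : (2 * i + 1) % 2 = 1 := by omega
  rw [h1, h2]

-- the canonical list both loops compute: indices a..a+b-1, value 5·binDec, filtered into [l, r]
def tailI (l r : Int) (a b : Nat) : List Int :=
  ((List.range' a b).map (fun i => ((5 * binDec i : Nat) : Int))).filter
    (fun x => decide (l ≤ x ∧ x ≤ r))

theorem tailI_nil (l r : Int) (a b : Nat) (h : r < (5 * binDec a : Nat)) :
    tailI l r a b = [] := by
  unfold tailI
  rw [List.filter_eq_nil_iff]
  intro x hx
  simp only [List.mem_map, List.mem_range'_1] at hx
  obtain ⟨j, ⟨hj1, _⟩, rfl⟩ := hx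
  have hm : binDec a ≤ binDec j := binDec_mono hj1
  simp only [decide_eq_true_eq, not_and, not_le]
  intro _
  have : ((5 * binDec a : Nat) : Int) ≤ ((5 * binDec j : Nat) : Int) := by
    push_cast; omega
  omega

theorem gt_M_big (r : Int) (a : Nat) (h : r.toNat < a) : r < (5 * binDec a : Nat) := by
  have h1 : a ≤ binDec a := binDec_ge a
  have h2 : r ≤ (r.toNat : Int) := Int.self_le_toNat r
  have : (a : Int) ≤ ((5 * binDec a : Nat) : Int) := by push_cast; omega
  have : ((r.toNat : Nat) : Int) < (a : Int) := by exact_mod_cast h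
  omega

theorem tailI_split (l r : Int) (a b c : Nat) :
    tailI l r a (b + c) = tailI l r a b ++ tailI l r (a + b) c := by
  unfold tailI
  rw [← List.range'_append_1, List.map_append, List.filter_append]

-- characterization of A's loop
theorem loopA_eq (l r : Int) (f i : Nat) (n : Int) (acc : List Int)
    (hf : r.toNat + 3 ≤ f + i) :
    loopA f l r acc i n =
      if n > r then acc else acc ++ tailI l r i (2 ^ (r.toNat + 2) - i) := by
  induction f generalizing i n acc with
  | zero =>
    simp only [loopA]
    split
    · rfl
    · rw [tailI_nil l r _ _ (gt_M_big r i (by omega)), List.append_nil]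
  | succ f ih =>
    rw [loopA]
    split
    · rfl
    · rename_i hnr
      simp only [pyIntBase10_binDigits]
      set n' : Int := 5 * ((binDec i : Nat) : Int) with hn'
      have hcast : n' = ((5 * binDec i : Nat) : Int) := by push_cast [hn']; ring
      rw [ih (i + 1) _ _ (by omega)]
      by_cases hbig : n' > r
      · -- current value already exceeds r: nothing appended now or later
        simp only [hbig, if_pos]
        have hp : ¬ (l ≤ n' ∧ n' ≤ r) := by omega
        simp only [hp, if_neg, not_false_iff]
        rw [tailI_nil l r i _ (by rw [← hcast]; omega), List.append_nil]
      · simp only [hbig, if_neg, not_false_iff]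
        -- i is small: i ≤ binDec i ≤ r.toNat < 2^(r.toNat+2)
        have hle : (binDec i : Int) ≤ r := by push_cast at hcast; omega
        have hbd : binDec i ≤ r.toNat := by omega
        have hi : i ≤ r.toNat := le_trans (binDec_ge i) hbd
        have hiN : i < 2 ^ (r.toNat + 2) := by
          have h1 : r.toNat < 2 ^ r.toNat := Nat.lt_two_pow_self
          have h2 : 2 ^ r.toNat ≤ 2 ^ (r.toNat + 2) := Nat.pow_le_pow_right (by omega) (by omega)
          omega
        have hsplit : 2 ^ (r.toNat + 2) - i = 1 + (2 ^ (r.toNat + 2) - (i + 1)) := by omega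
        rw [hsplit, tailI_split]
        have h1 : tailI l r i 1 = if l ≤ n' ∧ n' ≤ r then [n'] else [] := by
          unfold tailI
          simp only [List.range'_one, List.map_cons, List.map_nil, ← hcast]
          by_cases h : l ≤ n' ∧ n' ≤ r
          · simp [List.filter_cons, h]
          · simp [List.filter_cons, h]
        rw [h1]
        by_cases h : l ≤ n' ∧ n' ≤ r
        · simp [h]
        · simp [h]

-- levels of B's loop: level d (d ≥ 1) holds binDec of indices [2^d, 2^(d+1)) that survive the 5q ≤ r pruning
def lvl (r : Int) (d : Nat) : List Int :=
  ((List.range' (2 ^ d) (2 ^ d)).map (fun i => ((binDec i : Nat) : Int))).filter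
    (fun q => decide (5 * q ≤ r))

theorem range'_double (a b : Nat) :
    List.range' (2 * a) (2 * b) = (List.range' a b).flatMap (fun i => [2 * i, 2 * i + 1]) := by
  induction b generalizing a with
  | zero => simp
  | succ b ih =>
    have h3 : List.range' (2 * a) (2 * (b + 1)) =
        2 * a :: (2 * a + 1) :: List.range' (2 * (a + 1)) (2 * b) := by
      have e : 2 * (b + 1) = (2 * b) + 1 + 1 := by ring
      rw [e, List.range'_succ, List.range'_succ]
      have e2 : 2 * a + 1 + 1 = 2 * (a + 1) := by ring
      rw [e2]
    rw [h3, List.range'_succ, List.flatMap_cons, ih (a + 1)]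
    simp

theorem flatMap_filter_children (r : Int) (xs : List Nat) (hx : ∀ i ∈ xs, 1 ≤ i) :
    ((xs.map (fun i => ((binDec i : Nat) : Int))).filter (fun q => decide (5 * q ≤ r))).flatMap
        (fun q => [10 * q, 10 * q + 1].filter (fun t => decide (5 * t ≤ r)))
      = ((xs.flatMap (fun i => [2 * i, 2 * i + 1])).map
          (fun i => ((binDec i : Nat) : Int))).filter (fun q => decide (5 * q ≤ r)) := by
  induction xs with
  | nil => simp
  | cons x xs ih =>
    have hih := ih (fun i hi => hx i (List.mem_cons_of_mem x hi))
    have e1 : ((binDec (2 * x) : Nat) : Int) = 10 * ((binDec x : Nat) : Int) := by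
      rw [binDec_double]; push_cast; ring
    have e2 : ((binDec (2 * x + 1) : Nat) : Int) = 10 * ((binDec x : Nat) : Int) + 1 := by
      rw [binDec_double_succ]; push_cast; ring
    by_cases hk : 5 * ((binDec x : Nat) : Int) ≤ r
    · rw [List.map_cons, List.filter_cons_of_pos (by simpa using hk), List.flatMap_cons, hih,
        List.flatMap_cons, List.map_append, List.filter_append]
      congr 1
      simp only [List.map_cons, List.map_nil, e1, e2]
    · have hb : (0 : Int) ≤ ((binDec x : Nat) : Int) := by positivity
      have hc1 : ¬ 5 * ((binDec (2 * x) : Nat) : Int) ≤ r := by rw [e1]; omega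
      have hc2 : ¬ 5 * ((binDec (2 * x + 1) : Nat) : Int) ≤ r := by rw [e2]; omega
      rw [List.map_cons, List.filter_cons_of_neg (by simpa using hk), hih, List.flatMap_cons,
        List.map_append, List.filter_append]
      have hz : List.filter (fun t => decide (5 * t ≤ r))
          (List.map (fun i : Nat => ((binDec i : Nat) : Int)) [2 * x, 2 * x + 1]) = [] := by
        simp [hc1, hc2]
      rw [hz, List.nil_append]

theorem lvl_succ (r : Int) (d : Nat) :
    (lvl r d).flatMap (fun q => [10 * q, 10 * q + 1].filter (fun t => decide (5 * t ≤ r)))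
      = lvl r (d + 1) := by
  unfold lvl
  rw [flatMap_filter_children r _ (fun i hi => by
    simp only [List.mem_range'_1] at hi
    have := Nat.one_le_two_pow (n := d)
    omega)]
  congr 1
  rw [← range'_double]
  congr 1 <;> ring

theorem lvl_res_chunk (l r : Int) (d : Nat) :
    ((lvl r d).filter (fun q => decide (l ≤ 5 * q ∧ 5 * q ≤ r))).map (fun q => 5 * q)
      = tailI l r (2 ^ d) (2 ^ d) := by
  unfold lvl tailI
  rw [List.filter_filter, List.filter_map, List.filter_map, List.map_map]
  have hP : ∀ i : Nat,
      ((fun q => decide (l ≤ 5 * q ∧ 5 * q ≤ r) && decide (5 * q ≤ r)) ∘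
        (fun i : Nat => ((binDec i : Nat) : Int))) i
      = ((fun x => decide (l ≤ x ∧ x ≤ r)) ∘ (fun i : Nat => ((5 * binDec i : Nat) : Int))) i := by
    intro i
    simp only [Function.comp_apply]
    by_cases h : l ≤ 5 * ((binDec i : Nat) : Int) ∧ 5 * ((binDec i : Nat) : Int) ≤ r
    · have h' : l ≤ ((5 * binDec i : Nat) : Int) ∧ ((5 * binDec i : Nat) : Int) ≤ r := by
        push_cast; push_cast at h; omega
      simp [h, h.2, h']
    · have h' : ¬ (l ≤ ((5 * binDec i : Nat) : Int) ∧ ((5 * binDec i : Nat) : Int) ≤ r) := by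
        push_cast; push_cast at h; omega
      simp [h, h']
  rw [List.filter_congr (fun i _ => hP i)]
  apply List.map_congr_left
  intro i _
  simp only [Function.comp_apply]
  push_cast; ring

-- characterization of B's loop on a well-formed level
theorem loopB_eq (l r : Int) (f d : Nat) (res : List Int)
    (hf : r.toNat + 2 ≤ f + d) :
    loopB f l r res (lvl r d) = res ++ tailI l r (2 ^ d) (2 ^ (r.toNat + 2) - 2 ^ d) := by
  induction f generalizing d res with
  | zero =>
    simp only [loopB]
    rw [tailI_nil l r _ _ (gt_M_big r (2 ^ d) (by
      have h1 : d < 2 ^ d := Nat.lt_two_pow_self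
      omega)), List.append_nil]
  | succ f ih =>
    rw [loopB]
    by_cases hemp : lvl r d = []
    · simp only [hemp, if_pos]
      -- the head index 2^d of the level was pruned, hence everything from 2^d on is out of range
      have hmem : (2 ^ d : Nat) ∈ List.range' (2 ^ d) (2 ^ d) := by
        simp only [List.mem_range'_1]
        exact ⟨Nat.le_refl _, by have := Nat.one_le_two_pow (n := d); omega⟩
      have hpr : ¬ (5 * ((binDec (2 ^ d) : Nat) : Int) ≤ r) := by
        intro hcon
        have : ((binDec (2 ^ d) : Nat) : Int) ∈ lvl r d := by
          unfold lvl
          rw [List.mem_filter]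
          exact ⟨List.mem_map_of_mem hmem, by simpa using hcon⟩
        simp [hemp] at this
      rw [tailI_nil l r _ _ (by push_cast at hpr ⊢; omega), List.append_nil]
    · simp only [hemp, if_neg, not_false_iff]
      rw [lvl_res_chunk, lvl_succ, ih (d + 1) _ (by omega)]
      -- the level is non-empty, so 5·2^d ≤ r and the index window splits at 2^(d+1)
      obtain ⟨q, hq⟩ := List.exists_mem_of_ne_nil _ hemp
      unfold lvl at hq
      rw [List.mem_filter] at hq
      obtain ⟨hq1, hq2⟩ := hq
      simp only [List.mem_map, List.mem_range'_1] at hq1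
      obtain ⟨j, ⟨hj1, _⟩, rfl⟩ := hq1
      simp only [decide_eq_true_eq] at hq2
      have hjb : (j : Int) ≤ ((binDec j : Nat) : Int) := by
        have := binDec_ge j; push_cast; omega
      have h2d : ((2 ^ d : Nat) : Int) ≤ r := by
        have : ((2 ^ d : Nat) : Int) ≤ (j : Int) := by exact_mod_cast hj1
        omega
      have hdM : 2 ^ d ≤ r.toNat := by
        have h0 : (0 : Int) ≤ ((2 ^ d : Nat) : Int) := by positivity
        omega
      have hdlt : d + 1 ≤ r.toNat + 2 := by
        have : d < 2 ^ d := Nat.lt_two_pow_self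
        omega
      have hsplit : 2 ^ (r.toNat + 2) - 2 ^ d = 2 ^ d + (2 ^ (r.toNat + 2) - 2 ^ (d + 1)) := by
        have h1 : 2 ^ (d + 1) ≤ 2 ^ (r.toNat + 2) := Nat.pow_le_pow_right (by omega) hdlt
        have h2 : 2 ^ (d + 1) = 2 ^ d + 2 ^ d := by rw [pow_succ]; ring
        omega
      rw [hsplit, tailI_split, List.append_assoc]
      congr 2
      rw [pow_succ]; ring_nf

theorem lvl_one (r : Int) :
    [(1 : Int)].flatMap (fun q => [10 * q, 10 * q + 1].filter (fun t => decide (5 * t ≤ r)))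
      = lvl r 1 := by
  unfold lvl
  norm_num [List.range'_succ, List.range'_one, binDec_two, binDec_three]

-- both loops compute the canonical list L = tailI l r 1 (2^(r.toNat+2) - 1)
theorem loopA_top (l r : Int) :
    loopA (r.toNat + 2) l r [] 1 5 = tailI l r 1 (2 ^ (r.toNat + 2) - 1) := by
  rw [loopA_eq l r (r.toNat + 2) 1 5 [] (by omega)]
  by_cases h5 : (5 : Int) > r
  · simp only [h5, if_pos]
    rw [tailI_nil l r 1 _ (by rw [binDec_one]; push_cast; omega)]
  · simp [h5]

theorem chunk_one (l r : Int) :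
    (([(1 : Int)].filter (fun q => decide (l ≤ 5 * q ∧ 5 * q ≤ r))).map (fun q => 5 * q))
      = tailI l r 1 1 := by
  unfold tailI
  simp only [List.range'_one, List.map_cons, List.map_nil, binDec_one]
  norm_num
  by_cases h : l ≤ (5 : Int) ∧ (5 : Int) ≤ r
  · simp [List.filter_cons, h]
  · simp [List.filter_cons, h]

theorem loopB_top (l r : Int) :
    loopB (r.toNat + 2) l r [] [1] = tailI l r 1 (2 ^ (r.toNat + 2) - 1) := by
  have hf : r.toNat + 2 = (r.toNat + 1) + 1 := by omega
  rw [hf, loopB]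
  simp only [reduceCtorEq, if_neg, not_false_iff]
  rw [lvl_one, loopB_eq l r (r.toNat + 1) 1 _ (by omega)]
  rw [List.nil_append, chunk_one]
  have hpow : 2 ^ (r.toNat + 1 + 1) - 1 = 1 + (2 ^ (r.toNat + 1 + 1) - 2 ^ 1) := by
    have : 4 ≤ 2 ^ (r.toNat + 1 + 1) := by
      calc (4 : Nat) = 2 ^ 2 := by norm_num
      _ ≤ 2 ^ (r.toNat + 1 + 1) := Nat.pow_le_pow_right (by omega) (by omega)
    omega
  rw [hpow, tailI_split]
  norm_num

theorem L_pairwise (l r : Int) (a b : Nat) :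
    (tailI l r a b).Pairwise (fun x y => x ≤ y) := by
  unfold tailI
  apply List.Pairwise.filter
  refine List.Pairwise.map _ ?_ (List.pairwise_lt_range' (s := a) (n := b) 1)
  intro i j hij
  have := binDec_strictMono hij
  push_cast
  omega

-- ===== VERDICT (by name: the statement is the Claim_ definition above) =====
theorem solution_spec : Claim_equal_solution := by
  intro l r _
  unfold Spec_solution solution solution_alt
  simp only [loopA_top, loopB_top]
  by_cases h : tailI l r 1 (2 ^ (r.toNat + 2) - 1) = []
  · simp [h]
  · simp [h, PySem.List.sorted_eq_self_of_pairwise _ _ (L_pairwise l r 1 _)]
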